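-- pv_equiv track=rewrite | github.com/stringertheory/advent-of-code | 2020/11.py | n_occupied_adjacent
-- ===== SOURCE A (Python) =====
-- def n_occupied_adjacent(layout, x, y):
--     n = 0
--     for dx in [-1, 0, 1]:
--         for dy in [-1, 0, 1]:
--             if dx == 0 and dy == 0:
--                 continue
--             else:
--                 i = x + dx
--                 j = y + dy
--                 if 0 <= i < len(layout) and 0 <= j < len(layout[0]):
--                     v = layout[i][j]
--                     if v == '#':
--                         n +=1
--     return n
-- ===== SOURCE B (Python) =====
-- def n_occupied_adjacent(layout, x, y):
--     if not layout:
--         return 0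
--     w = len(layout[0])
--     total = 0
--     for row in layout[max(0, x - 1):max(0, x + 2)]:
--         total += row[max(0, y - 1):max(0, min(y + 2, w))].count('#')
--     if 0 <= x < len(layout) and 0 <= y < w and layout[x][y] == '#':
--         total -= 1
--     return total
-- ===== Notes on version B (the rewrite author's own statement) =====
-- stated objective: alternative
-- what changed: B slices the clamped 3x3 neighbourhood block out of the grid and counts '#' per sliced row, then subtracts 1 for an occupied in-bounds centre cell, instead of A's double loop over the 8 neighbour offsets with per-cell bounds checks.
-- outside the precondition, e.g. on n_occupied_adjacent([['#', '#'], ['#']], 5, 0): A returns 0, B returns 0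
import Mathlib
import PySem

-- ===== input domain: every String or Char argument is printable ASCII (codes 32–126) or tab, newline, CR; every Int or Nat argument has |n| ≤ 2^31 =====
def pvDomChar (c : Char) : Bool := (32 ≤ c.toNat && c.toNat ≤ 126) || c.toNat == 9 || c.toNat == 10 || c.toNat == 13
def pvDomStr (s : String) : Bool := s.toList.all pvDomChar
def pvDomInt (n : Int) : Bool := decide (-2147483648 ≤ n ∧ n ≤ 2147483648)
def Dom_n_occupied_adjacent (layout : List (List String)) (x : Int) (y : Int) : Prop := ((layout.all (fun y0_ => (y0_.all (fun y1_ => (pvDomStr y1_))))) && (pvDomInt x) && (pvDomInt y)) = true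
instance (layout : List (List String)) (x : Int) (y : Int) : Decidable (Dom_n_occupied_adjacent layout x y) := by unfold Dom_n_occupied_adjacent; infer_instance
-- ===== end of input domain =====

-- B counts '#' in the clamped 3x3 sliced sub-grid and subtracts the centre cell,
-- instead of iterating over the 8 neighbour offsets (objective: alternative decomposition).

-- ===== PORT A =====
-- literal transliteration of A: two nested for-loops over the offset lists [-1,0,1],
-- skipping (0,0), bounds-checking against len(layout) and len(layout[0]).
-- pyGet? returning none = Python IndexError (ragged row shorter than row 0); excluded by Pre_.
def n_occupied_adjacent (layout : List (List String)) (x : Int) (y : Int) : Int :=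
  ([-1, 0, 1] : List Int).foldl (fun n dx =>
    ([-1, 0, 1] : List Int).foldl (fun n dy =>
      if dx = 0 ∧ dy = 0 then n
      else
        let i := x + dx
        let j := y + dy
        if 0 ≤ i ∧ i < (layout.length : Int) ∧ 0 ≤ j ∧ j < ((layout.headD []).length : Int) then
          match PySem.List.pyGet? layout i with
          | some row =>
            match PySem.List.pyGet? row j with
            | some v => if v = "#" then n + 1 else n
            | none => n
          | none => n
        else n) n) 0

-- ===== PORT B =====
-- literal transliteration of B (Source B): slice the clamped 3x3 block, count '#'
-- per sliced row, then subtract 1 for an occupied in-bounds centre cell.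
-- pyGet? returning none = Python IndexError (ragged row shorter than row 0); excluded by Pre_.
def n_occupied_adjacent_alt (layout : List (List String)) (x : Int) (y : Int) : Int :=
  if layout = [] then 0
  else
    let w : Int := ((layout.headD []).length : Int)
    let total : Int :=
      (PySem.List.slice layout (some (max 0 (x - 1))) (some (max 0 (x + 2)))).foldl
        (fun t row =>
          t + (PySem.List.count
                (PySem.List.slice row (some (max 0 (y - 1))) (some (max 0 (min (y + 2) w)))) "#" : Int)) 0
    if 0 ≤ x ∧ x < (layout.length : Int) ∧ 0 ≤ y ∧ y < w then
      match PySem.List.pyGet? layout x with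
      | some row =>
        match PySem.List.pyGet? row y with
        | some v => if v = "#" then total - 1 else total
        | none => total
      | none => total
    else total

-- ===== PRECONDITION & SPEC =====
-- Pre_ excludes ragged grids with a row shorter than row 0: there A raises IndexError when
-- the 3x3 neighbourhood touches the short row; on such grids A still returns when the
-- neighbourhood stays away from the short rows (see claim.json "cites").
def Pre_n_occupied_adjacent (layout : List (List String)) (x : Int) (y : Int) : Prop :=
  ∀ r ∈ layout, (layout.headD []).length ≤ r.length
instance (layout : List (List String)) (x : Int) (y : Int) : Decidable (Pre_n_occupied_adjacent layout x y) := by unfold Pre_n_occupied_adjacent; infer_instance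

def pvWitness_n_occupied_adjacent : List (List String) × Int × Int := ([["#", "."], [".", "#"]], 0, 0)

def Spec_n_occupied_adjacent (layout : List (List String)) (x : Int) (y : Int) (out : Int) : Prop := out = n_occupied_adjacent_alt layout x y
instance (layout : List (List String)) (x : Int) (y : Int) (out : Int) : Decidable (Spec_n_occupied_adjacent layout x y out) := by unfold Spec_n_occupied_adjacent; infer_instance

-- ===== CLAIM (what is proved, stated in full; the proofs are below) =====
def Claim_equal_n_occupied_adjacent : Prop := ∀ (layout : List (List String)) (x : Int) (y : Int), Dom_n_occupied_adjacent layout x y → Pre_n_occupied_adjacent layout x y → Spec_n_occupied_adjacent layout x y (n_occupied_adjacent layout x y)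

-- ===== LEMMAS AND PROOFS =====

-- prefix sums of f over the first t elements of a list
def pvPS {α : Type} (l : List α) (f : α → Int) (t : Nat) : Int := ((l.take t).map f).sum

theorem pvPS_stable {α : Type} (l : List α) (f : α → Int) (t : Nat) (h : l.length ≤ t) :
    pvPS l f t = pvPS l f l.length := by
  unfold pvPS
  rw [List.take_of_length_le h, List.take_length]

theorem pvPS_succ {α : Type} (l : List α) (f : α → Int) (t : Nat) (h : t < l.length) :
    pvPS l f (t + 1) = pvPS l f t + f l[t] := by
  unfold pvPS
  rw [List.take_add_one, List.map_append, List.sum_append]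
  simp [List.getElem?_eq_getElem h]

theorem pvPS_congr {α : Type} (l : List α) (f g : α → Int) (t : Nat)
    (h : ∀ x ∈ l, f x = g x) : pvPS l f t = pvPS l g t := by
  unfold pvPS
  rw [List.map_congr_left (fun x hx => h x (List.mem_of_mem_take hx))]

theorem pvCore {α : Type} (l : List α) (f : α → Int) (A k : Nat) :
    (((l.drop A).take k).map f).sum = pvPS l f (A + k) - pvPS l f A := by
  have h : l.take (A + k) = l.take A ++ (l.drop A).take k := List.take_add ..
  unfold pvPS
  rw [h, List.map_append, List.sum_append]
  ring

-- sum of f over the clamped Python slice l[max(0,lo) : b] as a difference of prefix sums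
theorem pvSliceSum {α : Type} (l : List α) (f : α → Int) (n : Nat) (lo hi b : Int)
    (hb0 : 0 ≤ b) (hbt : b.toNat = min hi.toNat n) (hlh : lo ≤ hi) :
    ((PySem.List.slice l (some (max 0 lo)) (some b)).map f).sum
      = pvPS l f (min hi.toNat n) - pvPS l f (min lo.toNat n) := by
  rw [PySem.List.slice_toNat l (le_max_left 0 lo) hb0, pvCore]
  rcases Nat.lt_or_ge b.toNat (max 0 lo).toNat with hcase | hcase
  · have h2 : lo.toNat ≤ hi.toNat := by omega
    have h1 : (max 0 lo).toNat + (b.toNat - (max 0 lo).toNat) = (max 0 lo).toNat := by omega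
    have h3 : min hi.toNat n = n := by omega
    have h4 : min lo.toNat n = n := by omega
    rw [h1, h3, h4]
    ring
  · have h1 : (max 0 lo).toNat + (b.toNat - (max 0 lo).toNat) = min hi.toNat n := by omega
    have h2 : (max 0 lo).toNat = min lo.toNat n := by omega
    rw [h1, h2]

-- one guarded access as a difference of prefix sums
theorem pvStep {α : Type} (l : List α) (f : α → Int) (n : Nat) (hn : n ≤ l.length) (j : Int) :
    (if 0 ≤ j ∧ j < (n : Int) then ((PySem.List.pyGet? l j).map f).getD 0 else 0)
      = pvPS l f (min (j + 1).toNat n) - pvPS l f (min j.toNat n) := by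
  split_ifs with h
  · have hj : j.toNat < n := by omega
    have h1 : min (j + 1).toNat n = j.toNat + 1 := by omega
    have h2 : min j.toNat n = j.toNat := by omega
    rw [h1, h2, pvPS_succ l f j.toNat (by omega),
      PySem.List.pyGet?_of_nonneg l h.1, List.getElem?_eq_getElem (by omega)]
    simp
  · by_cases hj : j < 0
    · have h1 : min (j + 1).toNat n = 0 := by omega
      have h2 : min j.toNat n = 0 := by omega
      rw [h1, h2]; ring
    · have h1 : min (j + 1).toNat n = n := by omega
      have h2 : min j.toNat n = n := by omega
      rw [h1, h2]; ring

-- indicator of an occupied cell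
def pvFH (v : String) : Int := if v = "#" then 1 else 0

-- A's guarded cell read (bounds check + double indexing) as a value
def pvCell (l : List (List String)) (i j : Int) : Int :=
  if 0 ≤ i ∧ i < (l.length : Int) ∧ 0 ≤ j ∧ j < ((l.headD []).length : Int) then
    ((PySem.List.pyGet? l i).map
      (fun row => ((PySem.List.pyGet? row j).map pvFH).getD 0)).getD 0
  else 0

-- A's guarded column read within one row
def pvTE (W : Nat) (row : List String) (j : Int) : Int :=
  if 0 ≤ j ∧ j < (W : Int) then ((PySem.List.pyGet? row j).map pvFH).getD 0 else 0

-- one offset term of A's double loop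
def pvT (l : List (List String)) (x y dx dy : Int) : Int :=
  if dx = 0 ∧ dy = 0 then 0 else pvCell l (x + dx) (y + dy)

-- the canonical row value: '#'-count of row restricted to columns {y-1,y,y+1} ∩ [0,W)
def pvRV (W : Nat) (y : Int) (row : List String) : Int :=
  pvPS row pvFH (min (y + 2).toNat W) - pvPS row pvFH (min (y - 1).toNat W)

-- the loop body of A's inner for-loop, named for rewriting
def pvBodyFn (l : List (List String)) (x y n dx dy : Int) : Int :=
  if dx = 0 ∧ dy = 0 then n
  else
    if 0 ≤ x + dx ∧ x + dx < (l.length : Int) ∧ 0 ≤ y + dy ∧ y + dy < ((l.headD []).length : Int) then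
      match PySem.List.pyGet? l (x + dx) with
      | some row =>
        match PySem.List.pyGet? row (y + dy) with
        | some v => if v = "#" then n + 1 else n
        | none => n
      | none => n
    else n

theorem pvBodyFn_eq (l : List (List String)) (x y n dx dy : Int) :
    pvBodyFn l x y n dx dy = n + pvT l x y dx dy := by
  unfold pvBodyFn pvT pvCell
  split_ifs with h1 h2
  · ring
  · rcases hr : PySem.List.pyGet? l (x + dx) with _ | row
    · simp
    · rcases hc : PySem.List.pyGet? row (y + dy) with _ | v
      · simp [hc]
      · by_cases hv : v = "#" <;> simp [hc, pvFH, hv]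
  · ring

theorem pvA_sum (l : List (List String)) (x y : Int) :
    n_occupied_adjacent l x y =
      pvT l x y (-1) (-1) + pvT l x y (-1) 0 + pvT l x y (-1) 1 +
      pvT l x y 0 (-1) + pvT l x y 0 0 + pvT l x y 0 1 +
      pvT l x y 1 (-1) + pvT l x y 1 0 + pvT l x y 1 1 := by
  have h : n_occupied_adjacent l x y =
      pvBodyFn l x y (pvBodyFn l x y (pvBodyFn l x y
        (pvBodyFn l x y (pvBodyFn l x y (pvBodyFn l x y
          (pvBodyFn l x y (pvBodyFn l x y (pvBodyFn l x y 0 (-1) (-1)) (-1) 0) (-1) 1)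
        0 (-1)) 0 0) 0 1)
      1 (-1)) 1 0) 1 1 := rfl
  rw [h, pvBodyFn_eq, pvBodyFn_eq, pvBodyFn_eq, pvBodyFn_eq, pvBodyFn_eq,
    pvBodyFn_eq, pvBodyFn_eq, pvBodyFn_eq, pvBodyFn_eq]
  ring

theorem pvT_off (l : List (List String)) (x y dx dy : Int) (h : ¬(dx = 0 ∧ dy = 0)) :
    pvT l x y dx dy = pvCell l (x + dx) (y + dy) := by
  unfold pvT
  rw [if_neg h]

theorem pvT_center (l : List (List String)) (x y : Int) :
    pvT l x y 0 0 = 0 := by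
  unfold pvT
  rw [if_pos ⟨rfl, rfl⟩]

-- A as 3x3 block sum minus the centre cell
theorem pvA_cells (l : List (List String)) (x y : Int) :
    n_occupied_adjacent l x y =
      (pvCell l (x - 1) (y - 1) + pvCell l (x - 1) y + pvCell l (x - 1) (y + 1)) +
      (pvCell l x (y - 1) + pvCell l x y + pvCell l x (y + 1)) +
      (pvCell l (x + 1) (y - 1) + pvCell l (x + 1) y + pvCell l (x + 1) (y + 1)) -
      pvCell l x y := by
  rw [pvA_sum, pvT_center,
    pvT_off l x y (-1) (-1) (by norm_num), pvT_off l x y (-1) 0 (by norm_num),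
    pvT_off l x y (-1) 1 (by norm_num), pvT_off l x y 0 (-1) (by norm_num),
    pvT_off l x y 0 1 (by norm_num), pvT_off l x y 1 (-1) (by norm_num),
    pvT_off l x y 1 0 (by norm_num), pvT_off l x y 1 1 (by norm_num)]
  have e1 : x + -1 = x - 1 := by ring
  have e2 : y + -1 = y - 1 := by ring
  have e3 : x + 0 = x := by ring
  have e4 : y + 0 = y := by ring
  rw [e1, e2, e3, e4]
  ring

-- split the combined bounds check of pvCell into row check then column check
theorem pvCell_split (l : List (List String)) (i j : Int) :
    pvCell l i j =
      (if 0 ≤ i ∧ i < (l.length : Int) then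
        ((PySem.List.pyGet? l i).map
          (fun row => pvTE (l.headD []).length row j)).getD 0
      else 0) := by
  unfold pvCell
  by_cases h1 : 0 ≤ i ∧ i < (l.length : Int)
  · by_cases h2 : 0 ≤ j ∧ j < ((l.headD []).length : Int)
    · rw [if_pos ⟨h1.1, h1.2, h2.1, h2.2⟩, if_pos h1]
      rcases _hr : PySem.List.pyGet? l i with _ | row
      · simp
      · simp only [Option.map_some, Option.getD_some]
        unfold pvTE
        rw [if_pos h2]
    · rw [if_neg (by tauto), if_pos h1]
      rcases _hr : PySem.List.pyGet? l i with _ | row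
      · simp
      · simp only [Option.map_some, Option.getD_some]
        unfold pvTE
        rw [if_neg h2]
  · rw [if_neg (by tauto), if_neg h1]

theorem pvTE_eq (W : Nat) (row : List String) (hW : W ≤ row.length) (j : Int) :
    pvTE W row j = pvPS row pvFH (min (j + 1).toNat W) - pvPS row pvFH (min j.toNat W) := by
  unfold pvTE
  exact pvStep row pvFH W hW j

-- the three column terms of one row telescope to the canonical row value
theorem pvRow_eq (W : Nat) (row : List String) (hW : W ≤ row.length) (y : Int) :
    pvTE W row (y - 1) + pvTE W row y + pvTE W row (y + 1) = pvRV W y row := by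
  rw [pvTE_eq W row hW (y - 1), pvTE_eq W row hW y, pvTE_eq W row hW (y + 1)]
  have e1 : y - 1 + 1 = y := by ring
  have e2 : y + 1 + 1 = y + 2 := by ring
  rw [e1, e2]
  unfold pvRV
  ring

-- one row band of the 3x3 block as a difference of row-prefix sums
theorem pvBand (l : List (List String)) (y : Int)
    (hpre : ∀ r ∈ l, (l.headD []).length ≤ r.length) (i : Int) :
    pvCell l i (y - 1) + pvCell l i y + pvCell l i (y + 1) =
      pvPS l (pvRV (l.headD []).length y) (min (i + 1).toNat l.length) -
      pvPS l (pvRV (l.headD []).length y) (min i.toNat l.length) := by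
  rw [pvCell_split l i (y - 1), pvCell_split l i y, pvCell_split l i (y + 1)]
  have key : (if 0 ≤ i ∧ i < (l.length : Int) then
        ((PySem.List.pyGet? l i).map (pvRV (l.headD []).length y)).getD 0
      else 0) =
      pvPS l (pvRV (l.headD []).length y) (min (i + 1).toNat l.length) -
      pvPS l (pvRV (l.headD []).length y) (min i.toNat l.length) :=
    pvStep l (pvRV (l.headD []).length y) l.length (le_refl _) i
  rw [← key]
  split_ifs with h
  · rcases hr : PySem.List.pyGet? l i with _ | row
    · simp
    · simp only [Option.map_some, Option.getD_some]
      exact pvRow_eq (l.headD []).length row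
        (hpre row (PySem.List.mem_of_pyGet?_eq_some l hr)) y
  · ring

-- A, fully reduced to prefix sums of canonical row values
theorem pvA_final (l : List (List String)) (x y : Int)
    (hpre : ∀ r ∈ l, (l.headD []).length ≤ r.length) :
    n_occupied_adjacent l x y =
      pvPS l (pvRV (l.headD []).length y) (min (x + 2).toNat l.length) -
      pvPS l (pvRV (l.headD []).length y) (min (x - 1).toNat l.length) -
      pvCell l x y := by
  rw [pvA_cells, pvBand l y hpre (x - 1), pvBand l y hpre x, pvBand l y hpre (x + 1)]
  have e1 : x - 1 + 1 = x := by ring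
  have e2 : x + 1 + 1 = x + 2 := by ring
  rw [e1, e2]
  ring

-- the '#'-count of a list of strings as a sum of indicators
theorem pvCount_eq (l : List String) :
    ((PySem.List.count l "#" : Nat) : Int) = (l.map pvFH).sum := by
  rw [PySem.List.count_eq]
  induction l with
  | nil => simp
  | cons a t ih =>
    by_cases h : a = "#"
    · simp [pvFH, h, ih]
      omega
    · simp [pvFH, h, ih]

-- B's per-row slice count equals the canonical row value
theorem pvG_eq (W : Nat) (y : Int) (row : List String) :
    ((PySem.List.count
        (PySem.List.slice row (some (max 0 (y - 1))) (some (max 0 (min (y + 2) (W : Int))))) "#" : Nat) : Int)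
      = pvRV W y row := by
  rw [pvCount_eq]
  unfold pvRV
  exact pvSliceSum row pvFH W (y - 1) (y + 2) (max 0 (min (y + 2) (W : Int)))
    (le_max_left 0 _) (by omega) (by omega)

-- B's trailing centre correction
theorem pvCenter (l : List (List String)) (x y : Int) (total : Int) :
    (if 0 ≤ x ∧ x < (l.length : Int) ∧ 0 ≤ y ∧ y < ((l.headD []).length : Int) then
       match PySem.List.pyGet? l x with
       | some row =>
         match PySem.List.pyGet? row y with
         | some v => if v = "#" then total - 1 else total
         | none => total
       | none => total
     else total) = total - pvCell l x y := by
  unfold pvCell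
  split_ifs with h
  · rcases hr : PySem.List.pyGet? l x with _ | row
    · simp
    · rcases hc : PySem.List.pyGet? row y with _ | v
      · simp [hc]
      · by_cases hv : v = "#" <;> simp [hc, pvFH, hv]
  · ring

-- B, fully reduced to prefix sums of canonical row values
theorem pvB_final (l : List (List String)) (x y : Int) (h : l ≠ []) :
    n_occupied_adjacent_alt l x y =
      pvPS l (pvRV (l.headD []).length y) ((x + 2).toNat) -
      pvPS l (pvRV (l.headD []).length y) (min (x - 1).toNat (x + 2).toNat) -
      pvCell l x y := by
  unfold n_occupied_adjacent_alt
  rw [if_neg h]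
  show (if 0 ≤ x ∧ x < (l.length : Int) ∧ 0 ≤ y ∧ y < ((l.headD []).length : Int) then
      match PySem.List.pyGet? l x with
      | some row =>
        match PySem.List.pyGet? row y with
        | some v =>
          if v = "#" then
            (PySem.List.slice l (some (max 0 (x - 1))) (some (max 0 (x + 2)))).foldl
              (fun t row =>
                t + ((PySem.List.count
                      (PySem.List.slice row (some (max 0 (y - 1)))
                        (some (max 0 (min (y + 2) ((l.headD []).length : Int))))) "#" : Nat) : Int)) 0 - 1
          else
            (PySem.List.slice l (some (max 0 (x - 1))) (some (max 0 (x + 2)))).foldl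
              (fun t row =>
                t + ((PySem.List.count
                      (PySem.List.slice row (some (max 0 (y - 1)))
                        (some (max 0 (min (y + 2) ((l.headD []).length : Int))))) "#" : Nat) : Int)) 0
        | none =>
          (PySem.List.slice l (some (max 0 (x - 1))) (some (max 0 (x + 2)))).foldl
            (fun t row =>
              t + ((PySem.List.count
                    (PySem.List.slice row (some (max 0 (y - 1)))
                      (some (max 0 (min (y + 2) ((l.headD []).length : Int))))) "#" : Nat) : Int)) 0
      | none =>
        (PySem.List.slice l (some (max 0 (x - 1))) (some (max 0 (x + 2)))).foldl
          (fun t row =>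
            t + ((PySem.List.count
                  (PySem.List.slice row (some (max 0 (y - 1)))
                    (some (max 0 (min (y + 2) ((l.headD []).length : Int))))) "#" : Nat) : Int)) 0
    else
      (PySem.List.slice l (some (max 0 (x - 1))) (some (max 0 (x + 2)))).foldl
        (fun t row =>
          t + ((PySem.List.count
                (PySem.List.slice row (some (max 0 (y - 1)))
                  (some (max 0 (min (y + 2) ((l.headD []).length : Int))))) "#" : Nat) : Int)) 0)
    = pvPS l (pvRV (l.headD []).length y) ((x + 2).toNat) -
      pvPS l (pvRV (l.headD []).length y) (min (x - 1).toNat (x + 2).toNat) -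
      pvCell l x y
  rw [pvCenter]
  rw [PySem.List.foldl_add
      (PySem.List.slice l (some (max 0 (x - 1))) (some (max 0 (x + 2))))
      (fun row => ((PySem.List.count
        (PySem.List.slice row (some (max 0 (y - 1)))
          (some (max 0 (min (y + 2) ((l.headD []).length : Int))))) "#" : Nat) : Int)) 0]
  have hmap := pvSliceSum l
      (fun row => ((PySem.List.count
        (PySem.List.slice row (some (max 0 (y - 1)))
          (some (max 0 (min (y + 2) ((l.headD []).length : Int))))) "#" : Nat) : Int))
      ((x + 2).toNat) (x - 1) (x + 2) (max 0 (x + 2)) (le_max_left 0 _) (by omega) (by omega)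
  rw [hmap,
    pvPS_congr l _ (pvRV (l.headD []).length y) _ (fun r _ => pvG_eq (l.headD []).length y r),
    pvPS_congr l _ (pvRV (l.headD []).length y) _ (fun r _ => pvG_eq (l.headD []).length y r)]
  have e : min (x + 2).toNat (x + 2).toNat = (x + 2).toNat := by omega
  rw [e]
  ring

-- ===== VERDICT (by name: the statement is the Claim_ definition above) =====
theorem n_occupied_adjacent_spec : Claim_equal_n_occupied_adjacent := by
  intro layout x y _ hpre
  unfold Spec_n_occupied_adjacent
  unfold Pre_n_occupied_adjacent at hpre
  by_cases hnil : layout = []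
  · subst hnil
    rw [pvA_final [] x y hpre]
    unfold n_occupied_adjacent_alt
    rw [if_pos rfl]
    have h0 : ∀ t : Nat, pvPS ([] : List (List String)) (pvRV (([] : List (List String)).headD []).length y) t = 0 := by
      intro t; simp [pvPS]
    have hc : pvCell [] x y = 0 := by
      unfold pvCell
      rw [if_neg (by intro hcon; simp at hcon; omega)]
    rw [h0, h0, hc]
    ring
  · rw [pvA_final layout x y hpre, pvB_final layout x y hnil]
    by_cases hbig : (x + 2).toNat ≤ layout.length
    · have e1 : min (x + 2).toNat layout.length = (x + 2).toNat := by omega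
      have e2 : min (x - 1).toNat layout.length = min (x - 1).toNat (x + 2).toNat := by omega
      rw [e1, e2]
    · have e1 : min (x + 2).toNat layout.length = layout.length := by omega
      rw [e1, pvPS_stable layout _ ((x + 2).toNat) (by omega)]
      by_cases hsm : (x - 1).toNat ≤ layout.length
      · have e2 : min (x - 1).toNat layout.length = min (x - 1).toNat (x + 2).toNat := by omega
        rw [e2]
      · have e2 : min (x - 1).toNat layout.length = layout.length := by omega
        have e3 : min (x - 1).toNat (x + 2).toNat = (x - 1).toNat := by omega
        rw [e2, e3, pvPS_stable layout _ ((x - 1).toNat) (by omega)]
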